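-- pv_equiv track=rewrite | github.com/001TMF/PhytoVenomics-ML | antibody_pipeline/filtering/developability.py | check_ptm_sites
-- ===== SOURCE A (Python) =====
-- from typing import Dict, List, Tuple
--
-- def check_ptm_sites(
--
--     sequence: str
-- ) -> Dict[str, List[int]]:
--     """
--     Check for potential post-translational modification sites.
--
--     Args:
--         sequence: Amino acid sequence
--
--     Returns:
--         Dictionary of PTM sites
--     """
--     ptm_sites = {
--         'N_glycosylation': [],  # N-X-S/T (X != P)
--         'deamidation': [],  # N-G or N-S
--         'isomerization': [],  # D-G or D-S
--         'oxidation': [],  # M, W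
--     }
--
--     # N-glycosylation: N-X-S/T where X is not P
--     for i in range(len(sequence) - 2):
--         if sequence[i] == 'N' and sequence[i + 1] != 'P' and sequence[i + 2] in ['S', 'T']:
--             ptm_sites['N_glycosylation'].append(i)
--
--     # Deamidation: N-G or N-S
--     for i in range(len(sequence) - 1):
--         if sequence[i] == 'N' and sequence[i + 1] in ['G', 'S']:
--             ptm_sites['deamidation'].append(i)
--
--     # Isomerization: D-G or D-S
--     for i in range(len(sequence) - 1):
--         if sequence[i] == 'D' and sequence[i + 1] in ['G', 'S']:
--             ptm_sites['isomerization'].append(i)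
--
--     # Oxidation: M, W
--     for i, aa in enumerate(sequence):
--         if aa in ['M', 'W']:
--             ptm_sites['oxidation'].append(i)
--
--     return ptm_sites
-- ===== SOURCE B (Python) =====
-- from typing import Dict, List
--
-- def check_ptm_sites(
--     sequence: str
-- ) -> Dict[str, List[int]]:
--     """Single ascending pass over the sequence collecting all four PTM motif kinds at once."""
--     n = len(sequence)
--     glyc: List[int] = []
--     deam: List[int] = []
--     isom: List[int] = []
--     oxid: List[int] = []
--     for i in range(n):
--         aa = sequence[i]
--         if aa == 'M' or aa == 'W':
--             oxid.append(i)
--         if i + 1 < n: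
--             nxt = sequence[i + 1]
--             if aa == 'N' and (nxt == 'G' or nxt == 'S'):
--                 deam.append(i)
--             if aa == 'D' and (nxt == 'G' or nxt == 'S'):
--                 isom.append(i)
--             if i + 2 < n and aa == 'N' and nxt != 'P' and (sequence[i + 2] == 'S' or sequence[i + 2] == 'T'):
--                 glyc.append(i)
--     return {
--         'N_glycosylation': glyc,
--         'deamidation': deam,
--         'isomerization': isom,
--         'oxidation': oxid,
--     }
-- ===== Notes on version B (the rewrite author's own statement) =====
-- stated objective: alternative
-- what changed: B replaces A's four separate scans of the sequence (one per PTM kind) with one single ascending pass that checks all four motifs at each index under explicit i+1/i+2 bound guards.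
import Mathlib
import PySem

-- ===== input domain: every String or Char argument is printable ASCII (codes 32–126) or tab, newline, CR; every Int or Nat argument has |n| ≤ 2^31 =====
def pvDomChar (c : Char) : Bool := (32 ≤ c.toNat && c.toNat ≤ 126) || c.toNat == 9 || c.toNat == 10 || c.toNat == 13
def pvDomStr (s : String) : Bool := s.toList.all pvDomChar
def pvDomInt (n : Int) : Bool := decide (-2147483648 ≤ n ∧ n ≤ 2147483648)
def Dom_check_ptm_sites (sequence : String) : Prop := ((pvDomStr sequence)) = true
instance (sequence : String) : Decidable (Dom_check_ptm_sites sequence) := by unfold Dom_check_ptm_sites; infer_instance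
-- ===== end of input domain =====

-- B makes one single ascending pass collecting all four PTM motif kinds at once instead of A's four
-- separate scans (alternative decomposition; same asymptotic cost). Both are total; no Pre_ needed.

-- ===== PORT A =====
-- Four separate loops, exactly A's structure.  sequence[i] is ported with pyGetD: every index the
-- loops reach is in range in Python, so the default is never returned.
def check_ptm_sites (sequence : String) : List (String × List Int) :=
  let cs := sequence.toList
  let n : Int := PySem.Str.len sequence
  let glyc := (PySem.List.pyRange 0 (n - 2)).foldl (fun acc i =>
      if (PySem.List.pyGetD cs i ' ' == 'N' && PySem.List.pyGetD cs (i + 1) ' ' != 'P' &&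
          (PySem.List.pyGetD cs (i + 2) ' ' == 'S' || PySem.List.pyGetD cs (i + 2) ' ' == 'T'))
      then acc ++ [i] else acc) []
  let deam := (PySem.List.pyRange 0 (n - 1)).foldl (fun acc i =>
      if (PySem.List.pyGetD cs i ' ' == 'N' &&
          (PySem.List.pyGetD cs (i + 1) ' ' == 'G' || PySem.List.pyGetD cs (i + 1) ' ' == 'S'))
      then acc ++ [i] else acc) []
  let isom := (PySem.List.pyRange 0 (n - 1)).foldl (fun acc i =>
      if (PySem.List.pyGetD cs i ' ' == 'D' &&
          (PySem.List.pyGetD cs (i + 1) ' ' == 'G' || PySem.List.pyGetD cs (i + 1) ' ' == 'S'))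
      then acc ++ [i] else acc) []
  let oxid := (PySem.List.enumerate cs).foldl (fun acc p =>
      if (p.2 == 'M' || p.2 == 'W') then acc ++ [p.1] else acc) []
  [("N_glycosylation", glyc), ("deamidation", deam), ("isomerization", isom), ("oxidation", oxid)]

-- ===== PORT B =====
-- the body of B's single for-loop: one step updates all four accumulators
def bStep (cs : List Char) (n : Int) (st : List Int × List Int × List Int × List Int) (i : Int) :
    List Int × List Int × List Int × List Int :=
  let aa := PySem.List.pyGetD cs i ' '
  let o := if (aa == 'M' || aa == 'W') then st.2.2.2 ++ [i] else st.2.2.2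
  if i + 1 < n then
    let nxt := PySem.List.pyGetD cs (i + 1) ' '
    let d := if (aa == 'N' && (nxt == 'G' || nxt == 'S')) then st.2.1 ++ [i] else st.2.1
    let z := if (aa == 'D' && (nxt == 'G' || nxt == 'S')) then st.2.2.1 ++ [i] else st.2.2.1
    let g := if (decide (i + 2 < n) && (aa == 'N') && (nxt != 'P') &&
        (PySem.List.pyGetD cs (i + 2) ' ' == 'S' || PySem.List.pyGetD cs (i + 2) ' ' == 'T'))
      then st.1 ++ [i] else st.1
    (g, d, z, o)
  else (st.1, st.2.1, st.2.2.1, o)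

def check_ptm_sites_alt (sequence : String) : List (String × List Int) :=
  let cs := sequence.toList
  let n : Int := PySem.Str.len sequence
  let r := (PySem.List.pyRange 0 n).foldl (bStep cs n) ([], [], [], [])
  [("N_glycosylation", r.1), ("deamidation", r.2.1), ("isomerization", r.2.2.1), ("oxidation", r.2.2.2)]

-- ===== PRECONDITION & SPEC =====
def Spec_check_ptm_sites (sequence : String) (out : List (String × List Int)) : Prop := out = check_ptm_sites_alt sequence
instance (sequence : String) (out : List (String × List Int)) : Decidable (Spec_check_ptm_sites sequence out) := by unfold Spec_check_ptm_sites; infer_instance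

-- ===== CLAIM (what is proved, stated in full; the proofs are below) =====
def Claim_equal_check_ptm_sites : Prop := ∀ (sequence : String), Dom_check_ptm_sites sequence → Spec_check_ptm_sites sequence (check_ptm_sites sequence)

-- ===== LEMMAS AND PROOFS =====

-- the effective per-index append conditions of B's single pass
def pGlyc (cs : List Char) (i : Int) : Bool :=
  PySem.List.pyGetD cs i ' ' == 'N' && PySem.List.pyGetD cs (i + 1) ' ' != 'P' &&
    (PySem.List.pyGetD cs (i + 2) ' ' == 'S' || PySem.List.pyGetD cs (i + 2) ' ' == 'T')
def pDeam (cs : List Char) (i : Int) : Bool :=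
  PySem.List.pyGetD cs i ' ' == 'N' &&
    (PySem.List.pyGetD cs (i + 1) ' ' == 'G' || PySem.List.pyGetD cs (i + 1) ' ' == 'S')
def pIsom (cs : List Char) (i : Int) : Bool :=
  PySem.List.pyGetD cs i ' ' == 'D' &&
    (PySem.List.pyGetD cs (i + 1) ' ' == 'G' || PySem.List.pyGetD cs (i + 1) ' ' == 'S')
def pOxid (cs : List Char) (i : Int) : Bool :=
  PySem.List.pyGetD cs i ' ' == 'M' || PySem.List.pyGetD cs i ' ' == 'W'

theorem bStep_eq (cs : List Char) (n : Int) (st : List Int × List Int × List Int × List Int) (i : Int) :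
    bStep cs n st i =
      (st.1 ++ if decide (i + 2 < n) && pGlyc cs i then [i] else [],
       st.2.1 ++ if decide (i + 1 < n) && pDeam cs i then [i] else [],
       st.2.2.1 ++ if decide (i + 1 < n) && pIsom cs i then [i] else [],
       st.2.2.2 ++ if pOxid cs i then [i] else []) := by
  unfold bStep pGlyc pDeam pIsom pOxid
  by_cases h1 : i + 1 < n
  · have h1' : decide (i + 1 < n) = true := by simp [h1]
    simp only [if_pos h1, h1', Bool.true_and]
    split_ifs <;> simp_all [Bool.and_assoc]
  · have h2 : ¬ (i + 2 < n) := by omega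
    have h1' : decide (i + 1 < n) = false := by simp [h1]
    have h2' : decide (i + 2 < n) = false := by simp [h2]
    simp only [if_neg h1, h1', h2', Bool.false_and, Bool.and_assoc]
    split_ifs <;> simp_all

theorem bFold (cs : List Char) (n : Int) (l : List Int)
    (g d z o : List Int) :
    l.foldl (bStep cs n) (g, d, z, o) =
      (g ++ l.filter (fun i => decide (i + 2 < n) && pGlyc cs i),
       d ++ l.filter (fun i => decide (i + 1 < n) && pDeam cs i),
       z ++ l.filter (fun i => decide (i + 1 < n) && pIsom cs i),
       o ++ l.filter (fun i => pOxid cs i)) := by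
  induction l generalizing g d z o with
  | nil => simp
  | cons a l ih =>
    rw [List.foldl_cons, bStep_eq, ih]
    simp only [List.filter_cons, List.append_assoc]
    split_ifs <;> simp

-- dropping a bound guard shrinks the scanned range: filter with guard i+c<L over range(L)
-- equals the unguarded filter over range(L-c)
theorem filter_range_guard_nat (L c : Nat) (p : Nat → Bool) :
    (List.range L).filter (fun k => decide (k + c < L) && p k) = (List.range (L - c)).filter p := by
  by_cases h : c ≤ L
  · have hr : List.range L = List.range (L - c) ++ (List.range c).map (fun x => (L - c) + x) := by
      rw [← List.range_add]; congr 1; omega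
    rw [hr, List.filter_append]
    have h1 : (List.range (L - c)).filter (fun k => decide (k + c < L) && p k)
        = (List.range (L - c)).filter p := by
      apply List.filter_congr
      intro k hk
      rw [List.mem_range] at hk
      have hd : decide (k + c < L) = true := by simp; omega
      simp only [hd, Bool.true_and]
    have h2 : ((List.range c).map (fun x => (L - c) + x)).filter
        (fun k => decide (k + c < L) && p k) = [] := by
      rw [List.filter_eq_nil_iff]
      intro x hx
      simp only [List.mem_map] at hx
      obtain ⟨y, _, rfl⟩ := hx
      simp; omega
    rw [h1, h2, List.append_nil]
  · have hL : L - c = 0 := by omega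
    rw [hL]
    simp only [List.range_zero, List.filter_nil]
    rw [List.filter_eq_nil_iff]
    intro x hx
    rw [List.mem_range] at hx
    simp; omega

theorem filter_pyRange_guard (L c : Nat) (q : Int → Bool) :
    (PySem.List.pyRange 0 (L : Int)).filter (fun i => decide (i + (c : Int) < (L : Int)) && q i)
      = (PySem.List.pyRange 0 ((L : Int) - (c : Int))).filter q := by
  by_cases h : c ≤ L
  · have : ((L : Int) - (c : Int)) = ((L - c : Nat) : Int) := by omega
    rw [this, PySem.List.pyRange_zero_natCast, PySem.List.pyRange_zero_natCast,
      List.filter_map, List.filter_map]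
    have := filter_range_guard_nat L c (fun k => q (k : Int))
    simp only [Function.comp_def]
    rw [← this]
    congr 1
    apply List.filter_congr
    intro k _
    have : decide ((k : Int) + (c : Int) < (L : Int)) = decide (k + c < L) := by
      simp [decide_eq_decide]; omega
    rw [this]
  · have h2 : PySem.List.pyRange 0 ((L : Int) - (c : Int)) = [] := by
      rw [List.eq_nil_iff_forall_not_mem]
      intro x hx
      rw [PySem.List.mem_pyRange_one] at hx
      omega
    rw [h2, List.filter_nil, List.filter_eq_nil_iff]
    intro x hx
    rw [PySem.List.mem_pyRange_one] at hx
    simp; omega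

theorem filter_pyRange_guard2 (L : Nat) (q : Int → Bool) :
    (PySem.List.pyRange 0 (L : Int)).filter (fun i => decide (i + 2 < (L : Int)) && q i)
      = (PySem.List.pyRange 0 ((L : Int) - 2)).filter q := by
  simpa using filter_pyRange_guard L 2 q

theorem filter_pyRange_guard1 (L : Nat) (q : Int → Bool) :
    (PySem.List.pyRange 0 (L : Int)).filter (fun i => decide (i + 1 < (L : Int)) && q i)
      = (PySem.List.pyRange 0 ((L : Int) - 1)).filter q := by
  simpa using filter_pyRange_guard L 1 q

-- ===== VERDICT (by name: the statement is the Claim_ definition above) =====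
theorem check_ptm_sites_spec : Claim_equal_check_ptm_sites := by
  intro sequence _
  unfold Spec_check_ptm_sites check_ptm_sites check_ptm_sites_alt
  simp only [PySem.Str.len_eq]
  rw [bFold]
  simp only [pGlyc, pDeam, pIsom, pOxid]
  rw [PySem.List.foldl_append_if
        (fun i => PySem.List.pyGetD sequence.toList i ' ' == 'N' &&
            PySem.List.pyGetD sequence.toList (i + 1) ' ' != 'P' &&
            (PySem.List.pyGetD sequence.toList (i + 2) ' ' == 'S' ||
              PySem.List.pyGetD sequence.toList (i + 2) ' ' == 'T'))
        (fun i : Int => i),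
      PySem.List.foldl_append_if
        (fun i => PySem.List.pyGetD sequence.toList i ' ' == 'N' &&
            (PySem.List.pyGetD sequence.toList (i + 1) ' ' == 'G' ||
              PySem.List.pyGetD sequence.toList (i + 1) ' ' == 'S'))
        (fun i : Int => i),
      PySem.List.foldl_append_if
        (fun i => PySem.List.pyGetD sequence.toList i ' ' == 'D' &&
            (PySem.List.pyGetD sequence.toList (i + 1) ' ' == 'G' ||
              PySem.List.pyGetD sequence.toList (i + 1) ' ' == 'S'))
        (fun i : Int => i),
      PySem.List.foldl_append_if
        (fun p : Int × Char => p.2 == 'M' || p.2 == 'W') (fun p : Int × Char => p.1)]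
  rw [PySem.List.enumerate_eq_map_pyRange sequence.toList ' ', List.filter_map, List.map_map]
  simp only [List.map_id_fun', Function.comp_def, List.nil_append]
  rw [filter_pyRange_guard2 sequence.toList.length
        (fun i => PySem.List.pyGetD sequence.toList i ' ' == 'N' &&
            PySem.List.pyGetD sequence.toList (i + 1) ' ' != 'P' &&
            (PySem.List.pyGetD sequence.toList (i + 2) ' ' == 'S' ||
              PySem.List.pyGetD sequence.toList (i + 2) ' ' == 'T')),
      filter_pyRange_guard1 sequence.toList.length
        (fun i => PySem.List.pyGetD sequence.toList i ' ' == 'N' &&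
            (PySem.List.pyGetD sequence.toList (i + 1) ' ' == 'G' ||
              PySem.List.pyGetD sequence.toList (i + 1) ' ' == 'S')),
      filter_pyRange_guard1 sequence.toList.length
        (fun i => PySem.List.pyGetD sequence.toList i ' ' == 'D' &&
            (PySem.List.pyGetD sequence.toList (i + 1) ' ' == 'G' ||
              PySem.List.pyGetD sequence.toList (i + 1) ' ' == 'S'))]
  simp [PySem.List.len]
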